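-- pv_equiv track=rewrite | github.com/pedron8n8/Sheets-System | functions.py | _deslocar_intervalo_por_insercoes
-- ===== SOURCE A (Python) =====
-- def _deslocar_intervalo_por_insercoes(
--     min_row: int,
--     max_row: int,
--     insercoes: list[tuple[int, int]],
-- ) -> tuple[int, int]:
--     """Recalcula inicio/fim de um merge apos insercoes de linhas."""
--     novo_min = min_row
--     novo_max = max_row
--     for linha_insercao, quantidade in sorted(insercoes, key=lambda x: x[0]):
--         if linha_insercao <= novo_min:
--             novo_min += quantidade
--             novo_max += quantidade
--         elif novo_min < linha_insercao <= novo_max: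
--             novo_max += quantidade
--     return novo_min, novo_max
-- ===== SOURCE B (Python) =====
-- def _deslocar_intervalo_por_insercoes(
--     min_row: int,
--     max_row: int,
--     insercoes: list[tuple[int, int]],
-- ) -> tuple[int, int]:
--     """Recalcula inicio/fim de um merge apos insercoes de linhas."""
--     ordenadas = sorted(insercoes, key=lambda x: x[0])
--
--     def expandir(limite: int) -> int:
--         for linha_insercao, quantidade in ordenadas:
--             if linha_insercao > limite:
--                 break
--             limite += quantidade
--         return limite
--
--     return expandir(min_row), expandir(max_row)
-- ===== Notes on version B (the rewrite author's own statement) =====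
-- stated objective: simpler
-- what changed: Replaces A's single coupled min/max loop with its elif by one sort plus a small helper that expands each bound independently in its own early-exit pass (limite += quantidade while linha_insercao <= limite, break otherwise).
-- outside the precondition, e.g. on _deslocar_intervalo_por_insercoes(7, -6, [(5, 0), (6, 5), (-3, 1)]): A returns (13, 0), B returns (13, -6)
import Mathlib
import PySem

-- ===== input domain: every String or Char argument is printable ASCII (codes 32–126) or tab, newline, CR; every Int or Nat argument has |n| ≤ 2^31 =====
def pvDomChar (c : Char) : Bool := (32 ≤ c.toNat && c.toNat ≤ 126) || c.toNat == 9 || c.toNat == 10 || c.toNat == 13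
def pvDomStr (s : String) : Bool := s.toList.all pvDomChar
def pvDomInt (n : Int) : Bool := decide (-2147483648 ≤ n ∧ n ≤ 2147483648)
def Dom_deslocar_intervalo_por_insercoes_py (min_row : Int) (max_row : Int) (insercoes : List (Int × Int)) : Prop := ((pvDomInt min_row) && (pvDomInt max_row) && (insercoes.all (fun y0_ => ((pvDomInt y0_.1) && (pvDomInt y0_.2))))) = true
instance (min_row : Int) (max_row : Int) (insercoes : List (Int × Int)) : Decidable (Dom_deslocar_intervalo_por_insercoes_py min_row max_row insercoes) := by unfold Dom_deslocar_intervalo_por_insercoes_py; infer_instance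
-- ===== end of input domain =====

-- B replaces A's single coupled loop (with its min/max elif) by one sort plus an independent
-- early-exit expansion pass per bound — simpler: each bound's shift is computed on its own.

-- ===== PORT A =====
def deslocar_intervalo_por_insercoes_py (min_row : Int) (max_row : Int) (insercoes : List (Int × Int)) : Int × Int :=
  (PySem.List.sorted insercoes (fun x => x.1) false).foldl
    (fun s p =>
      if p.1 ≤ s.1 then (s.1 + p.2, s.2 + p.2)
      else if s.1 < p.1 ∧ p.1 ≤ s.2 then (s.1, s.2 + p.2)
      else s)
    (min_row, max_row)

-- ===== PORT B =====
-- Source B's helper `expandir`: walk the sorted insertions, stopping (break) at the first one above the bound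
def pvExpandir (limite : Int) : List (Int × Int) → Int
  | [] => limite
  | p :: rest => if p.1 > limite then limite else pvExpandir (limite + p.2) rest

def deslocar_intervalo_por_insercoes_py_alt (min_row : Int) (max_row : Int) (insercoes : List (Int × Int)) : Int × Int :=
  let ordenadas := PySem.List.sorted insercoes (fun x => x.1) false
  (pvExpandir min_row ordenadas, pvExpandir max_row ordenadas)

-- ===== PRECONDITION & SPEC =====
-- Pre_ excludes inverted ranges (min_row > max_row), a degenerate merge no caller should pass,
-- on which A's coupled elif can shift max_row while B's independent passes do not.
def Pre_deslocar_intervalo_por_insercoes_py (min_row : Int) (max_row : Int) (insercoes : List (Int × Int)) : Prop :=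
  min_row ≤ max_row
instance (min_row : Int) (max_row : Int) (insercoes : List (Int × Int)) : Decidable (Pre_deslocar_intervalo_por_insercoes_py min_row max_row insercoes) := by unfold Pre_deslocar_intervalo_por_insercoes_py; infer_instance

def pvWitness_deslocar_intervalo_por_insercoes_py : Int × Int × (List (Int × Int)) := (1, 3, [(2, 1), (5, 2)])

def Spec_deslocar_intervalo_por_insercoes_py (min_row : Int) (max_row : Int) (insercoes : List (Int × Int)) (out : Int × Int) : Prop := out = deslocar_intervalo_por_insercoes_py_alt min_row max_row insercoes
instance (min_row : Int) (max_row : Int) (insercoes : List (Int × Int)) (out : Int × Int) : Decidable (Spec_deslocar_intervalo_por_insercoes_py min_row max_row insercoes out) := by unfold Spec_deslocar_intervalo_por_insercoes_py; infer_instance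

-- ===== CLAIM (what is proved, stated in full; the proofs are below) =====
def Claim_equal_deslocar_intervalo_por_insercoes_py : Prop := ∀ (min_row : Int) (max_row : Int) (insercoes : List (Int × Int)), Dom_deslocar_intervalo_por_insercoes_py min_row max_row insercoes → Pre_deslocar_intervalo_por_insercoes_py min_row max_row insercoes → Spec_deslocar_intervalo_por_insercoes_py min_row max_row insercoes (deslocar_intervalo_por_insercoes_py min_row max_row insercoes)

-- ===== LEMMAS AND PROOFS =====

-- the one-bound step: shift the bound when the insertion row is at or below it
def pvStepF (x : Int) (p : Int × Int) : Int := if p.1 ≤ x then x + p.2 else x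

-- A's coupled fold decouples into two independent pvStepF folds; the invariant is
-- "m ≤ M, or every remaining insertion row lies strictly above m" (sortedness keeps it)
theorem pv_decouple (lst : List (Int × Int)) : ∀ (m M : Int),
    lst.Pairwise (fun a b => a.1 ≤ b.1) → (m ≤ M ∨ ∀ p ∈ lst, m < p.1) →
    lst.foldl (fun s p =>
      if p.1 ≤ s.1 then (s.1 + p.2, s.2 + p.2)
      else if s.1 < p.1 ∧ p.1 ≤ s.2 then (s.1, s.2 + p.2)
      else s) (m, M)
    = (lst.foldl pvStepF m, lst.foldl pvStepF M) := by
  induction lst with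
  | nil => intro m M _ _; simp
  | cons p rest ih =>
    intro m M hpw hinv
    rcases List.pairwise_cons.mp hpw with ⟨hhd, hrest⟩
    rcases hinv with hmM | hall
    · by_cases h1 : p.1 ≤ m
      · have h1' : p.1 ≤ M := le_trans h1 hmM
        simp only [List.foldl_cons, pvStepF, if_pos h1, if_pos h1']
        exact ih (m + p.2) (M + p.2) hrest (.inl (by omega))
      · by_cases h2 : p.1 ≤ M
        · simp only [List.foldl_cons, pvStepF, if_neg h1, if_pos h2,
            if_pos (show m < p.1 ∧ p.1 ≤ M by omega)]
          exact ih m (M + p.2) hrest (.inr (fun r hr => by have := hhd r hr; omega))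
        · simp only [List.foldl_cons, pvStepF, if_neg h1, if_neg h2,
            if_neg (show ¬ (m < p.1 ∧ p.1 ≤ M) by omega)]
          exact ih m M hrest (.inl hmM)
    · have hm : m < p.1 := hall p (List.mem_cons_self ..)
      have hallr : ∀ r ∈ rest, m < r.1 := fun r hr => hall r (List.mem_cons_of_mem _ hr)
      by_cases h2 : p.1 ≤ M
      · simp only [List.foldl_cons, pvStepF, if_neg (by omega : ¬ p.1 ≤ m), if_pos h2,
          if_pos (show m < p.1 ∧ p.1 ≤ M by omega)]
        exact ih m (M + p.2) hrest (.inr hallr)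
      · simp only [List.foldl_cons, pvStepF, if_neg (by omega : ¬ p.1 ≤ m), if_neg h2,
          if_neg (show ¬ (m < p.1 ∧ p.1 ≤ M) by omega)]
        exact ih m M hrest (.inr hallr)

-- once every remaining insertion row is above the bound, the fold leaves it unchanged
theorem pv_stay (lst : List (Int × Int)) : ∀ (x : Int), (∀ p ∈ lst, x < p.1) →
    lst.foldl pvStepF x = x := by
  induction lst with
  | nil => intro x _; simp
  | cons p rest ih =>
    intro x h
    have hp : x < p.1 := h p (List.mem_cons_self ..)
    simp only [List.foldl_cons, pvStepF, if_neg (by omega : ¬ p.1 ≤ x)]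
    exact ih x (fun r hr => h r (List.mem_cons_of_mem _ hr))

-- on a key-sorted list, the full fold equals the early-exit (break) pass
theorem pv_fold_eq_expandir (lst : List (Int × Int)) :
    ∀ (x : Int), lst.Pairwise (fun a b => a.1 ≤ b.1) →
    lst.foldl pvStepF x = pvExpandir x lst := by
  induction lst with
  | nil => intro x _; simp [pvExpandir]
  | cons p rest ih =>
    intro x hpw
    rcases List.pairwise_cons.mp hpw with ⟨hhd, hrest⟩
    by_cases h1 : p.1 ≤ x
    · simp only [List.foldl_cons, pvStepF, if_pos h1, pvExpandir,
        if_neg (by omega : ¬ p.1 > x)]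
      exact ih (x + p.2) hrest
    · simp only [List.foldl_cons, pvStepF, if_neg h1, pvExpandir,
        if_pos (by omega : p.1 > x)]
      exact pv_stay rest x (fun r hr => lt_of_not_ge h1 |>.trans_le (hhd r hr))

-- ===== VERDICT (by name: the statement is the Claim_ definition above) =====
theorem deslocar_intervalo_por_insercoes_py_spec : Claim_equal_deslocar_intervalo_por_insercoes_py := by
  intro min_row max_row insercoes _ hmM
  unfold Spec_deslocar_intervalo_por_insercoes_py
  unfold deslocar_intervalo_por_insercoes_py deslocar_intervalo_por_insercoes_py_alt
  set s := PySem.List.sorted insercoes (fun x => x.1) false with hs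
  have hpw : s.Pairwise (fun a b => a.1 ≤ b.1) := PySem.List.sorted_pairwise ..
  rw [pv_decouple s min_row max_row hpw (.inl hmM),
      pv_fold_eq_expandir s min_row hpw,
      pv_fold_eq_expandir s max_row hpw]
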